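-- pv_equiv track=rewrite | github.com/alex-p-pigeon/tg-story-bot | handlers/start_handlers.py | vB_st3___get_pain_distribution
-- ===== SOURCE A (Python) =====
-- PAIN_POINTS = {
--     '1': [  # Нужен для жизни в другой стране
--         'Познакомился с классными людьми, но не смог пообщаться',
--         'Уже здесь 3 месяца, но до сих пор заказываю еду жестами',
--         'Чувствую себя как ребенок — зависим от тех кто переводит',
--         'Коллеги шутят, а я просто улыбаюсь — не понимаю',
--         'Звонки по телефону — это кошмар, ничего не понимаю',
--         'Скоро переезжаю, боюсь не справиться',
--     ],
--     '2': [  # Хочу лучшую работу или повышение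
--         'Читаю тех доки легко, но на созвонах теряюсь',
--         'Знаю ответ на интервью, но не могу сформулировать',
--         'Сверстники уже работают в FAANG, а я застрял',
--         'Молчу на встречах, хотя есть что сказать',
--         'Видел вакансию мечты, но требуют fluent English',
--         'Коллеги берут интересные проекты — мне не предлагают',
--     ],
--     '3': [  # Свободно общаться в путешествиях
--         'В последней поездке весь отпуск показывал пальцем',
--         'Хочу узнать местные места, но не могу спросить',
--         'Учу фразы перед поездкой — через неделю всё забыл',
--         'Не понимаю таксиста — в итоге везет не туда',
--         'Экскурсии на английском дешевле, но я не понимаю',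
--         'Боюсь потеряться — не смогу объяснить адрес',
--     ],
--     '4': [  # Просто интересно (фильмы, игры, книги)
--         'Читаю книги с переводчиком — это не то',
--         'В сериалах шутки не смешные в переводе',
--         'Субтитры закрывают половину кадра',
--         'Мемы не понимаю — пропускаю культурный контекст',
--         'Слышу переводчика, а не настоящий голос актёра',
--         'Смотрю только то, что перевели — выбора нет',
--     ]
-- }
--
-- def vB_st3___get_pain_distribution(selected_icp):
--     """
--     Распределяет боли в зависимости от количества выбранных ICP
--
--     Args:
--         selected_icp: список выбранных ICP (например ['1', '3'])
--
--     Returns: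
--         list: список кортежей (icp_id, pain_text) в нужном порядке
--     """
--     num_selected = len(selected_icp)
--     pains_to_show = []
--
--     if num_selected == 0:
--         return []
--
--     elif num_selected == 1:
--         # 1 ICP → 6 болей
--         icp_id = selected_icp[0]
--         for pain in PAIN_POINTS.get(icp_id, [])[:6]:
--             pains_to_show.append((icp_id, pain))
--
--     elif num_selected == 2:
--         # 2 ICP → по 3 боли от каждого
--         for icp_id in selected_icp:
--             for pain in PAIN_POINTS.get(icp_id, [])[:3]:
--                 pains_to_show.append((icp_id, pain))
--
--     elif num_selected == 3:
--         # 3 ICP → по 2 боли от каждого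
--         for icp_id in selected_icp:
--             for pain in PAIN_POINTS.get(icp_id, [])[:2]:
--                 pains_to_show.append((icp_id, pain))
--
--     elif num_selected == 4:
--         # 4 ICP → 2+2+1+1
--         distribution = [2, 2, 1, 1]
--         for idx, icp_id in enumerate(selected_icp):
--             count = distribution[idx]
--             for pain in PAIN_POINTS.get(icp_id, [])[:count]:
--                 pains_to_show.append((icp_id, pain))
--
--     return pains_to_show
-- ===== SOURCE B (Python) =====
-- PAIN_POINTS = {
--     '1': [
--         'Познакомился с классными людьми, но не смог пообщаться',
--         'Уже здесь 3 месяца, но до сих пор заказываю еду жестами',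
--         'Чувствую себя как ребенок — зависим от тех кто переводит',
--         'Коллеги шутят, а я просто улыбаюсь — не понимаю',
--         'Звонки по телефону — это кошмар, ничего не понимаю',
--         'Скоро переезжаю, боюсь не справиться',
--     ],
--     '2': [
--         'Читаю тех доки легко, но на созвонах теряюсь',
--         'Знаю ответ на интервью, но не могу сформулировать',
--         'Сверстники уже работают в FAANG, а я застрял',
--         'Молчу на встречах, хотя есть что сказать',
--         'Видел вакансию мечты, но требуют fluent English',
--         'Коллеги берут интересные проекты — мне не предлагают',
--     ],
--     '3': [
--         'В последней поездке весь отпуск показывал пальцем',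
--         'Хочу узнать местные места, но не могу спросить',
--         'Учу фразы перед поездкой — через неделю всё забыл',
--         'Не понимаю таксиста — в итоге везет не туда',
--         'Экскурсии на английском дешевле, но я не понимаю',
--         'Боюсь потеряться — не смогу объяснить адрес',
--     ],
--     '4': [
--         'Читаю книги с переводчиком — это не то',
--         'В сериалах шутки не смешные в переводе',
--         'Субтитры закрывают половину кадра',
--         'Мемы не понимаю — пропускаю культурный контекст',
--         'Слышу переводчика, а не настоящий голос актёра',
--         'Смотрю только то, что перевели — выбора нет',
--     ]
-- }
--
-- TOTAL_PAINS = 6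
--
--
-- def vB_st3___get_pain_distribution(selected_icp):
--     # Fair division of a fixed quota of TOTAL_PAINS pains among the selected
--     # ICPs: each gets 6//n, and the first 6%n get one extra (front-loaded).
--     n = len(selected_icp)
--     if not 1 <= n <= 4:
--         return []
--     quota, extra = divmod(TOTAL_PAINS, n)
--     result = []
--     for i, icp_id in enumerate(selected_icp):
--         take = quota + (1 if i < extra else 0)
--         for pain in PAIN_POINTS.get(icp_id, [])[:take]:
--             result.append((icp_id, pain))
--     return result
-- ===== Notes on version B (the rewrite author's own statement) =====
-- stated objective: alternative
-- what changed: Replaces A's four hardcoded if/elif branches (each with its own per-branch counts 6 / 3,3 / 2,2,2 / 2,2,1,1) by an arithmetic fair-division rule: a fixed quota of 6 pains is split as divmod(6, n), giving each ICP 6//n pains and the first 6%n ICPs one extra, in a single loop.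
import Mathlib
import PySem

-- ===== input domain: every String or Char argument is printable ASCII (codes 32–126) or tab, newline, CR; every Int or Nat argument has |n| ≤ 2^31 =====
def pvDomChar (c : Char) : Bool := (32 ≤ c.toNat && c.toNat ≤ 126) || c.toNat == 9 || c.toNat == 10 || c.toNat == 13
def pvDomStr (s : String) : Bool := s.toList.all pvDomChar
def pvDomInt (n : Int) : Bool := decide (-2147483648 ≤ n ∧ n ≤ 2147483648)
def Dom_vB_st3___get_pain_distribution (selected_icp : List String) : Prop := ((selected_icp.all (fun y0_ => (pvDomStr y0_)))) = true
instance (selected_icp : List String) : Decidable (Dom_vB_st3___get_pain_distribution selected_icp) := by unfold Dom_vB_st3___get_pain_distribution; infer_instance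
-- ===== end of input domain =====

-- B replaces A's four hardcoded if/elif branches by an arithmetic fair-division rule
-- (divmod(6, n): each ICP gets 6//n pains, the first 6%n get one extra) in a single loop.

-- ===== PORT A =====
-- module constant PAIN_POINTS (dict str -> list str, insertion order)
def PAIN_POINTS : PySem.Dict String (List String) := PySem.Dict.ofList
  [ ("1", [ "Познакомился с классными людьми, но не смог пообщаться",
            "Уже здесь 3 месяца, но до сих пор заказываю еду жестами",
            "Чувствую себя как ребенок — зависим от тех кто переводит",
            "Коллеги шутят, а я просто улыбаюсь — не понимаю",
            "Звонки по телефону — это кошмар, ничего не понимаю",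
            "Скоро переезжаю, боюсь не справиться" ]),
    ("2", [ "Читаю тех доки легко, но на созвонах теряюсь",
            "Знаю ответ на интервью, но не могу сформулировать",
            "Сверстники уже работают в FAANG, а я застрял",
            "Молчу на встречах, хотя есть что сказать",
            "Видел вакансию мечты, но требуют fluent English",
            "Коллеги берут интересные проекты — мне не предлагают" ]),
    ("3", [ "В последней поездке весь отпуск показывал пальцем",
            "Хочу узнать местные места, но не могу спросить",
            "Учу фразы перед поездкой — через неделю всё забыл",
            "Не понимаю таксиста — в итоге везет не туда",
            "Экскурсии на английском дешевле, но я не понимаю",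
            "Боюсь потеряться — не смогу объяснить адрес" ]),
    ("4", [ "Читаю книги с переводчиком — это не то",
            "В сериалах шутки не смешные в переводе",
            "Субтитры закрывают половину кадра",
            "Мемы не понимаю — пропускаю культурный контекст",
            "Слышу переводчика, а не настоящий голос актёра",
            "Смотрю только то, что перевели — выбора нет" ]) ]

-- PAIN_POINTS.get(icp_id, [])[:k]  — the slice [:k] with k ≥ 0 is exactly List.take k
def painsTake (icp_id : String) (k : Nat) : List String :=
  (PySem.Dict.getD PAIN_POINTS icp_id []).take k

def vB_st3___get_pain_distribution (selected_icp : List String) : List (String × String) :=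
  let num_selected := selected_icp.length
  if num_selected = 0 then []
  else if num_selected = 1 then
    match selected_icp with
    | icp_id :: _ => (painsTake icp_id 6).foldl (fun acc pain => acc ++ [(icp_id, pain)]) []
    | [] => []
  else if num_selected = 2 then
    selected_icp.foldl (fun acc icp_id =>
      (painsTake icp_id 3).foldl (fun a pain => a ++ [(icp_id, pain)]) acc) []
  else if num_selected = 3 then
    selected_icp.foldl (fun acc icp_id =>
      (painsTake icp_id 2).foldl (fun a pain => a ++ [(icp_id, pain)]) acc) []
  else if num_selected = 4 then
    -- distribution[idx]: idx < 4 always holds here, so getD's default is never used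
    (PySem.List.enumerate selected_icp).foldl (fun acc p =>
      let count := PySem.List.pyGetD [2, 2, 1, 1] p.1 0
      (painsTake p.2 count).foldl (fun a pain => a ++ [(p.2, pain)]) acc) []
  else []

-- ===== PORT B =====
def vB_st3___get_pain_distribution_alt (selected_icp : List String) : List (String × String) :=
  let n := selected_icp.length
  if 1 ≤ n ∧ n ≤ 4 then
    -- divmod(6, n) with 1 ≤ n: both operands positive, so Python's divmod = Nat div/mod (exact)
    let quota := 6 / n
    let extra := 6 % n
    (PySem.List.enumerate selected_icp).foldl (fun acc p =>
      let take := quota + (if p.1 < (extra : Int) then 1 else 0)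
      (painsTake p.2 take).foldl (fun a pain => a ++ [(p.2, pain)]) acc) []
  else []

-- ===== PRECONDITION & SPEC =====
def Spec_vB_st3___get_pain_distribution (selected_icp : List String) (out : List (String × String)) : Prop := out = vB_st3___get_pain_distribution_alt selected_icp
instance (selected_icp : List String) (out : List (String × String)) : Decidable (Spec_vB_st3___get_pain_distribution selected_icp out) := by unfold Spec_vB_st3___get_pain_distribution; infer_instance

-- ===== CLAIM (what is proved, stated in full; the proofs are below) =====
def Claim_equal_vB_st3___get_pain_distribution : Prop := ∀ (selected_icp : List String), Dom_vB_st3___get_pain_distribution selected_icp → Spec_vB_st3___get_pain_distribution selected_icp (vB_st3___get_pain_distribution selected_icp)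

-- ===== LEMMAS AND PROOFS =====

-- ===== VERDICT (by name: the statement is the Claim_ definition above) =====
theorem vB_st3___get_pain_distribution_spec : Claim_equal_vB_st3___get_pain_distribution := by
  intro l _
  unfold Spec_vB_st3___get_pain_distribution
  match l with
  | [] => rfl
  | [a] =>
      simp [vB_st3___get_pain_distribution, vB_st3___get_pain_distribution_alt,
        PySem.List.enumerate_cons, PySem.List.enumerate_nil]
  | [a, b] =>
      simp [vB_st3___get_pain_distribution, vB_st3___get_pain_distribution_alt,
        PySem.List.enumerate_cons, PySem.List.enumerate_nil]
  | [a, b, c] =>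
      simp [vB_st3___get_pain_distribution, vB_st3___get_pain_distribution_alt,
        PySem.List.enumerate_cons, PySem.List.enumerate_nil]
  | [a, b, c, d] =>
      simp [vB_st3___get_pain_distribution, vB_st3___get_pain_distribution_alt,
        PySem.List.enumerate_cons, PySem.List.enumerate_nil,
        PySem.List.pyGetD]
  | a :: b :: c :: d :: e :: rest =>
      simp [vB_st3___get_pain_distribution, vB_st3___get_pain_distribution_alt, List.length]
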